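-- pv_equiv track=rewrite | github.com/YaniUdiani/Yani_IMSRG | IMSRG_Magnus.py | construct_basis_2B
-- ===== SOURCE A (Python) =====
-- def construct_basis_2B(holes, particles):
--   basis = []
--   for i in holes:
--     for j in holes:
--       basis.append((i, j))
--
--   for i in holes:
--     for a in particles:
--       basis.append((i, a))
--
--   for a in particles:
--     for i in holes:
--       basis.append((a, i))
--
--   for a in particles:
--     for b in particles:
--       basis.append((a, b))
--
--   return basis
-- ===== SOURCE B (Python) =====
-- def construct_basis_2B(holes, particles):
--     # Closed-form index addressing: the output has (H+P)^2 entries in four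
--     # contiguous blocks (hh, hp, ph, pp); decode each flat index k with divmod.
--     h, p = list(holes), list(particles)
--     H, P = len(h), len(p)
--     o1 = H * H
--     o2 = o1 + H * P
--     o3 = o2 + P * H
--     n = H + P
--     out = []
--     for k in range(n * n):
--         if k < o1:
--             pair = (h[k // H], h[k % H])
--         elif k < o2:
--             pair = (h[(k - o1) // P], p[(k - o1) % P])
--         elif k < o3:
--             pair = (p[(k - o2) // H], h[(k - o2) % H])
--         else:
--             pair = (p[(k - o3) // P], p[(k - o3) % P])
--         out.append(pair)
--     return out
-- ===== Notes on version B (the rewrite author's own statement) =====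
-- stated objective: alternative
-- what changed: Replaces the four nested append loops with a single flat loop over all (H+P)^2 output positions, decoding each flat index into its block and element positions by offset comparison and divmod instead of iterating over the input lists.
import Mathlib
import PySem

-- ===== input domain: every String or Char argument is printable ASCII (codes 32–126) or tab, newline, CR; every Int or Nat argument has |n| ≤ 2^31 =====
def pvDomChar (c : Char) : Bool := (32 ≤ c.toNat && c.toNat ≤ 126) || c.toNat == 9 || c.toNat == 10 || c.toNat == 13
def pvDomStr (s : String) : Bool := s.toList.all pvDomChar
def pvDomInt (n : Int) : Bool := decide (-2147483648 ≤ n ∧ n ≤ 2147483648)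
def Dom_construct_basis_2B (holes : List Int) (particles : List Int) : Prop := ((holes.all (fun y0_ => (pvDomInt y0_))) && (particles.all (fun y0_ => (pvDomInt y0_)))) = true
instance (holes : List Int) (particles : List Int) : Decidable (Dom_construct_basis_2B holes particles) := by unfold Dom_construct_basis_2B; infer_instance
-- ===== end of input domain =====

-- B replaces A's four nested loops by one flat loop over all (H+P)^2 indices,
-- decoding each index into block/row/column by offsets and divmod (alternative decomposition, same cost).


-- ===== PORT A =====
-- Port of A: four nested loops appending pairs into `basis`, transliterated as folds.
def construct_basis_2B (holes : List Int) (particles : List Int) : List (Int × Int) :=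
  let basis : List (Int × Int) := []
  let basis := holes.foldl (fun acc i => holes.foldl (fun acc j => acc ++ [(i, j)]) acc) basis
  let basis := holes.foldl (fun acc i => particles.foldl (fun acc a => acc ++ [(i, a)]) acc) basis
  let basis := particles.foldl (fun acc a => holes.foldl (fun acc i => acc ++ [(a, i)]) acc) basis
  let basis := particles.foldl (fun acc a => particles.foldl (fun acc b => acc ++ [(a, b)]) acc) basis
  basis

-- ===== PORT B =====
-- Port of B: one flat loop over range(n*n); each index is decoded by offset
-- comparison and divmod into its block and positions.  h[...] is ported with
-- pyGetD (exact here: every computed index is in range, so Python never raises),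
-- and x // y, x % y with PySem.Int.floordiv / mod (divisor nonzero whenever the
-- branch is reached, so divmod never raises).
def construct_basis_2B_alt (holes : List Int) (particles : List Int) : List (Int × Int) :=
  let h := holes
  let p := particles
  let H : Int := h.length
  let P : Int := p.length
  let o1 := H * H
  let o2 := o1 + H * P
  let o3 := o2 + P * H
  let n := H + P
  (PySem.List.pyRange 0 (n * n) 1).foldl (fun out k =>
    out ++ [if k < o1 then
              (PySem.List.pyGetD h (PySem.Int.floordiv k H) 0,
               PySem.List.pyGetD h (PySem.Int.mod k H) 0)
            else if k < o2 then
              (PySem.List.pyGetD h (PySem.Int.floordiv (k - o1) P) 0,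
               PySem.List.pyGetD p (PySem.Int.mod (k - o1) P) 0)
            else if k < o3 then
              (PySem.List.pyGetD p (PySem.Int.floordiv (k - o2) H) 0,
               PySem.List.pyGetD h (PySem.Int.mod (k - o2) H) 0)
            else
              (PySem.List.pyGetD p (PySem.Int.floordiv (k - o3) P) 0,
               PySem.List.pyGetD p (PySem.Int.mod (k - o3) P) 0)]) []

-- ===== PRECONDITION & SPEC =====
def Spec_construct_basis_2B (holes : List Int) (particles : List Int) (out : List (Int × Int)) : Prop := out = construct_basis_2B_alt holes particles
instance (holes : List Int) (particles : List Int) (out : List (Int × Int)) : Decidable (Spec_construct_basis_2B holes particles out) := by unfold Spec_construct_basis_2B; infer_instance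

-- ===== CLAIM (what is proved, stated in full; the proofs are below) =====
def Claim_equal_construct_basis_2B : Prop := ∀ (holes : List Int) (particles : List Int), Dom_construct_basis_2B holes particles → Spec_construct_basis_2B holes particles (construct_basis_2B holes particles)

-- ===== LEMMAS AND PROOFS =====

-- range(len(Y)) indexed back into Y reproduces Y.
theorem map_range_getD (Y : List Int) : (List.range Y.length).map (fun t => Y.getD t 0) = Y := by
  apply List.ext_getElem
  · simp
  · intro i h1 h2
    simp [List.getD, List.getElem?_eq_getElem h2]

-- One A-loop stage equals appending the block's product.
theorem stage_eq (X Y : List Int) (acc : List (Int × Int)) :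
    X.foldl (fun acc i => Y.foldl (fun acc j => acc ++ [(i, j)]) acc) acc
      = acc ++ X.flatMap (fun x => Y.map (fun y => (x, y))) := by
  calc X.foldl (fun acc i => Y.foldl (fun acc j => acc ++ [(i, j)]) acc) acc
      = X.foldl (fun acc i => acc ++ Y.map (fun y => (i, y))) acc := by
        apply PySem.List.foldl_congr_mem
        intro acc' x _
        exact PySem.List.foldl_append_singleton_eq_map _ _ _
    _ = acc ++ X.flatMap (fun x => Y.map (fun y => (x, y))) :=
        PySem.List.foldl_append_eq_flatMap _ _ _

-- Nat form of the block decoding: divmod over a flat range produces the product.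
theorem natBlock (X Y : List Int) :
    (List.range (X.length * Y.length)).map
        (fun t => (X.getD (t / Y.length) 0, Y.getD (t % Y.length) 0))
      = X.flatMap (fun x => Y.map (fun y => (x, y))) := by
  rcases Nat.eq_zero_or_pos Y.length with hL | hL
  · simp [List.length_eq_zero_iff.mp hL]
  · induction X with
    | nil => simp
    | cons x X' ih =>
      have hsplit : (x :: X').length * Y.length = Y.length + X'.length * Y.length := by
        simp [List.length_cons]; ring
      rw [hsplit, List.range_add, List.map_append, List.map_map]
      have seg1 : (List.range Y.length).map
          (fun t => ((x :: X').getD (t / Y.length) 0, Y.getD (t % Y.length) 0))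
          = Y.map (fun y => (x, y)) := by
        have hY : (List.range Y.length).map (fun t => Y.getD t 0) = Y :=
          map_range_getD Y
        calc (List.range Y.length).map
              (fun t => ((x :: X').getD (t / Y.length) 0, Y.getD (t % Y.length) 0))
            = (List.range Y.length).map (fun t => (x, Y.getD t 0)) := by
              apply List.map_congr_left
              intro t ht
              have ht' := List.mem_range.mp ht
              rw [Nat.div_eq_of_lt ht', Nat.mod_eq_of_lt ht', List.getD_cons_zero]
          _ = ((List.range Y.length).map (fun t => Y.getD t 0)).map (fun y => (x, y)) := by
              rw [List.map_map]; rfl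
          _ = Y.map (fun y => (x, y)) := by rw [hY]
      have seg2 : (List.range (X'.length * Y.length)).map
          ((fun t => ((x :: X').getD (t / Y.length) 0, Y.getD (t % Y.length) 0)) ∘
            (fun k => Y.length + k))
          = X'.flatMap (fun x => Y.map (fun y => (x, y))) := by
        rw [← ih]
        apply List.map_congr_left
        intro t _
        simp only [Function.comp_apply]
        have h1 : (Y.length + t) / Y.length = t / Y.length + 1 := by
          rw [Nat.add_comm, Nat.add_div_right _ hL]
        have h2 : (Y.length + t) % Y.length = t % Y.length := by
          rw [Nat.add_comm, Nat.add_mod_right]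
        rw [h1, h2, List.getD_cons_succ]
      rw [seg1, seg2, List.flatMap_cons]

-- Int form: a shifted pyRange segment decoded with floordiv/mod over offset c
-- produces exactly the (X × Y) block.
theorem blockMap (X Y : List Int) (c : Int) :
    (PySem.List.pyRange c (c + (X.length : Int) * (Y.length : Int)) 1).map
        (fun k => (PySem.List.pyGetD X (PySem.Int.floordiv (k - c) (Y.length : Int)) 0,
                   PySem.List.pyGetD Y (PySem.Int.mod (k - c) (Y.length : Int)) 0))
      = X.flatMap (fun x => Y.map (fun y => (x, y))) := by
  rw [PySem.List.pyRange_one, List.map_map]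
  have htn : (c + (X.length : Int) * (Y.length : Int) - c).toNat = X.length * Y.length := by
    omega
  rw [htn, ← natBlock X Y]
  apply List.map_congr_left
  intro t _
  simp only [Function.comp_apply]
  have h1 : c + (t : Int) - c = (t : Int) := by ring
  rw [h1, PySem.Int.floordiv_natCast, PySem.Int.mod_natCast,
      PySem.List.pyGetD_natCast, PySem.List.pyGetD_natCast]

-- ===== VERDICT (by name: the statement is the Claim_ definition above) =====
theorem construct_basis_2B_spec : Claim_equal_construct_basis_2B := by
  intro holes particles _
  unfold Spec_construct_basis_2B construct_basis_2B construct_basis_2B_alt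
  simp only [stage_eq, List.nil_append, List.append_assoc]
  rw [PySem.List.foldl_append_singleton_eq_map, List.nil_append]
  set H : Int := (holes.length : Int) with hH
  set P : Int := (particles.length : Int) with hP
  have hH0 : 0 ≤ H := by simp [hH]
  have hP0 : 0 ≤ P := by simp [hP]
  have hHH : 0 ≤ H * H := mul_nonneg hH0 hH0
  have hHP : 0 ≤ H * P := mul_nonneg hH0 hP0
  have hPH : 0 ≤ P * H := mul_nonneg hP0 hH0
  have hPP : 0 ≤ P * P := mul_nonneg hP0 hP0
  have hn : (H + P) * (H + P) = H * H + H * P + P * H + P * P := by ring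
  rw [PySem.List.pyRange_one_append 0 (H * H) ((H + P) * (H + P)) (by omega) (by omega),
      PySem.List.pyRange_one_append (H * H) (H * H + H * P) ((H + P) * (H + P)) (by omega) (by omega),
      PySem.List.pyRange_one_append (H * H + H * P) (H * H + H * P + P * H) ((H + P) * (H + P)) (by omega) (by omega)]
  simp only [List.map_append]
  congr 1
  · -- hh block
    have hbm := blockMap holes holes 0
    simp only [← hH, zero_add] at hbm
    rw [← hbm]
    apply List.map_congr_left
    intro k hk
    have hb := (PySem.List.mem_pyRange_one).mp hk
    rw [if_pos (by omega : k < H * H)]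
    simp only [sub_zero]
  congr 1
  · -- hp block
    have hbm := blockMap holes particles (H * H)
    simp only [← hH, ← hP] at hbm
    rw [← hbm]
    apply List.map_congr_left
    intro k hk
    have hb := (PySem.List.mem_pyRange_one).mp hk
    rw [if_neg (by omega : ¬ k < H * H), if_pos (by omega : k < H * H + H * P)]
  congr 1
  · -- ph block
    have hbm := blockMap particles holes (H * H + H * P)
    simp only [← hH, ← hP] at hbm
    rw [← hbm]
    apply List.map_congr_left
    intro k hk
    have hb := (PySem.List.mem_pyRange_one).mp hk
    rw [if_neg (by omega : ¬ k < H * H), if_neg (by omega : ¬ k < H * H + H * P),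
        if_pos (by omega : k < H * H + H * P + P * H)]
  · -- pp block
    have hbm := blockMap particles particles (H * H + H * P + P * H)
    simp only [← hP] at hbm
    rw [hn, ← hbm]
    apply List.map_congr_left
    intro k hk
    have hb := (PySem.List.mem_pyRange_one).mp hk
    rw [if_neg (by omega : ¬ k < H * H), if_neg (by omega : ¬ k < H * H + H * P),
        if_neg (by omega : ¬ k < H * H + H * P + P * H)]
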